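-- pv_equiv track=rewrite | github.com/Shravya-Suresh/Data-Automation | edgar_tracker/retrieval.py | _matches_form
-- ===== SOURCE A (Python) =====
-- def _matches_form(
--     raw_form: str,
--     allowed: set[str],
--     include_amendments: bool,
-- ) -> bool:
--     """Return whether *raw_form* matches one of *allowed* forms.
--
--     Handles ``/A`` amendment suffixes and older numeric suffix variants
--     like ``10-K405``.
--
--     Parameters
--     ----------
--     raw_form:
--         The form type string as reported by the SEC (e.g. ``"10-K"``,
--         ``"10-K/A"``, ``"10-K405"``).
--     allowed:
--         Set of upper-cased base form types to match (e.g. ``{"10-K", "10-Q"}``).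
--     include_amendments:
--         If ``False``, ``/A`` amendment forms are excluded.
--     """
--     rf = (raw_form or "").strip().upper()
--     if not rf:
--         return False
--
--     is_amend = "/A" in rf
--     if is_amend and not include_amendments:
--         return False
--
--     base = rf.split("/")[0]
--     if base in allowed:
--         return True
--
--     # Handle older numeric suffix variants (e.g. 10-K405).
--     for a in allowed:
--         if base.startswith(a):
--             suffix = base[len(a):]
--             if suffix.isdigit():
--                 return True
--     return False
-- ===== SOURCE B (Python) =====
-- def _matches_form(
--     raw_form: str,
--     allowed: set[str],
--     include_amendments: bool,
-- ) -> bool: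
--     """Candidate-set formulation: build the list of strings that would make the
--     form match (base itself, plus every cut prefix leaving a nonempty all-digit
--     suffix of base's trailing digit run) and test them against *allowed*."""
--     rf = (raw_form or "").strip().upper()
--     if not rf or ("/A" in rf and not include_amendments):
--         return False
--     base = rf.split("/", 1)[0]
--     # Start of the trailing run of digit characters.
--     i = len(base)
--     while i > 0 and base[i - 1].isdigit():
--         i -= 1
--     candidates = [base] + [base[:j] for j in range(i, len(base))]
--     return any(c in allowed for c in candidates)
-- ===== Notes on version B (the rewrite author's own statement) =====
-- stated objective: alternative
-- what changed: B replaces A's guard chain and its startswith+isdigit scan over `allowed` with a candidate-set formulation: it computes the trailing digit run of base once, builds the list of candidate strings (base plus each cut prefix with a nonempty all-digit suffix) and returns whether any candidate is in `allowed`, so set probes replace the per-allowed-element prefix/digit scan.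
import Mathlib
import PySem

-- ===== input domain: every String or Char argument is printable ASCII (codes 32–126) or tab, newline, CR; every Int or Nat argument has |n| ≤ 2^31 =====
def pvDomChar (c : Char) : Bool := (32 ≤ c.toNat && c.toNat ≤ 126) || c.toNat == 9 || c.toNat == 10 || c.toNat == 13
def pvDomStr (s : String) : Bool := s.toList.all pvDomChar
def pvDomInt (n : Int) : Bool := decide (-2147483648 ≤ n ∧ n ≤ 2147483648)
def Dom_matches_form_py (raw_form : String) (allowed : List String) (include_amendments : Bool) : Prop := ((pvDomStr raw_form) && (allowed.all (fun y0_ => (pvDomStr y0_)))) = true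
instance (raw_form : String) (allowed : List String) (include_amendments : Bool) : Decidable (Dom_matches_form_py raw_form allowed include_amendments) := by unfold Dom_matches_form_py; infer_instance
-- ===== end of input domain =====

-- B replaces A's startswith+isdigit scan over `allowed` with a candidate list (base plus
-- each cut prefix of the trailing digit run) probed against `allowed` (alternative decomposition).

-- ===== PORT A =====
def matches_form_py (raw_form : String) (allowed : List String) (include_amendments : Bool) : Bool :=
  -- rf = (raw_form or "").strip().upper()
  let r0 := if raw_form.toList = [] then [] else raw_form.toList
  let rf := PySem.Chars.upper (PySem.Chars.strip r0)
  if rf = [] then false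
  else
    let is_amend := PySem.Chars.isIn ['/', 'A'] rf
    if is_amend && !include_amendments then false
    else
      let base := (PySem.Chars.splitOn rf ['/']).headD []
      if allowed.any (fun a => a.toList == base) then true
      else
        -- for a in allowed: if base.startswith(a) and base[len(a):].isdigit(): return True
        allowed.any (fun a =>
          PySem.Chars.startswith base a.toList &&
          PySem.Chars.strIsdigit (PySem.Chars.slice base (some ((PySem.Chars.len a.toList : Int))) none))

-- ===== PORT B =====
-- helper for B's `while i > 0 and base[i-1].isdigit(): i -= 1`
def pvRunStart (cs : List Char) : Nat → Nat
  | 0 => 0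
  | i + 1 => if PySem.Chars.isdigit (cs.getD i ' ') then pvRunStart cs i else i + 1

def matches_form_py_alt (raw_form : String) (allowed : List String) (include_amendments : Bool) : Bool :=
  let rf := PySem.Chars.upper (PySem.Chars.strip
    (if raw_form.toList = [] then [] else raw_form.toList))
  if rf = [] || (PySem.Chars.isIn ['/', 'A'] rf && !include_amendments) then false
  else
    let base := (PySem.Chars.splitOn rf ['/']).headD []
    -- candidates = [base] + [base[:j] for j in range(i, len(base))]
    let candidates := base ::
      (PySem.List.pyRange ((pvRunStart base base.length : Nat) : Int) ((base.length : Nat) : Int) 1).map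
        (fun j => PySem.Chars.slice base none (some j))
    candidates.any (fun c => allowed.any (fun a => a.toList == c))

-- ===== PRECONDITION & SPEC =====
def Spec_matches_form_py (raw_form : String) (allowed : List String) (include_amendments : Bool) (out : Bool) : Prop := out = matches_form_py_alt raw_form allowed include_amendments
instance (raw_form : String) (allowed : List String) (include_amendments : Bool) (out : Bool) : Decidable (Spec_matches_form_py raw_form allowed include_amendments out) := by unfold Spec_matches_form_py; infer_instance

-- ===== CLAIM (what is proved, stated in full; the proofs are below) =====
def Claim_equal_matches_form_py : Prop := ∀ (raw_form : String) (allowed : List String) (include_amendments : Bool), Dom_matches_form_py raw_form allowed include_amendments → Spec_matches_form_py raw_form allowed include_amendments (matches_form_py raw_form allowed include_amendments)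

-- ===== LEMMAS AND PROOFS =====

lemma pvRunStart_le (cs : List Char) (i : Nat) : pvRunStart cs i ≤ i := by
  induction i with
  | zero => simp [pvRunStart]
  | succ k ih => unfold pvRunStart; split <;> omega

lemma pvRunStart_digits (cs : List Char) (i : Nat) (k : Nat)
    (h1 : pvRunStart cs i ≤ k) (h2 : k < i) :
    PySem.Chars.isdigit (cs.getD k ' ') = true := by
  induction i with
  | zero => omega
  | succ m ih =>
    unfold pvRunStart at h1
    by_cases hd : PySem.Chars.isdigit (cs.getD m ' ') = true
    · rw [if_pos hd] at h1
      rcases Nat.lt_succ_iff_lt_or_eq.mp h2 with h | h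
      · exact ih h1 h
      · exact h ▸ hd
    · rw [if_neg hd] at h1; omega

lemma pvRunStart_min (cs : List Char) (i : Nat) (j : Nat) (hj : j ≤ i)
    (h : ∀ k, j ≤ k → k < i → PySem.Chars.isdigit (cs.getD k ' ') = true) :
    pvRunStart cs i ≤ j := by
  induction i with
  | zero => simp [pvRunStart]
  | succ m ih =>
    unfold pvRunStart
    by_cases hd : PySem.Chars.isdigit (cs.getD m ' ') = true
    · rw [if_pos hd]
      by_cases hjm : j ≤ m
      · exact ih hjm (fun k hk1 hk2 => h k hk1 (by omega))
      · calc pvRunStart cs m ≤ m := pvRunStart_le cs m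
          _ ≤ j := by omega
    · rw [if_neg hd]
      by_contra hlt
      exact hd (h m (by omega) (by omega))

-- positional reading of `(cs.drop j).all isdigit`
lemma all_drop_iff (cs : List Char) (j : Nat) :
    (∀ x ∈ cs.drop j, PySem.Chars.isdigit x = true) ↔
      ∀ k, j ≤ k → k < cs.length → PySem.Chars.isdigit (cs.getD k ' ') = true := by
  constructor
  · intro h k hk1 hk2
    have hidx : k - j < (cs.drop j).length := by simp; omega
    have := h ((cs.drop j)[k - j]) (List.getElem_mem hidx)
    rw [List.getElem_drop] at this
    simp only [show j + (k - j) = k from by omega] at this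
    simp only [List.getD_eq_getElem?_getD, List.getElem?_eq_getElem hk2, Option.getD_some]
    exact this
  · intro h x hx
    rcases List.mem_iff_getElem.mp hx with ⟨idx, hidx, rfl⟩
    rw [List.getElem_drop]
    have hlen : j + idx < cs.length := by
      have := hidx; simp at this; omega
    have := h (j + idx) (by omega) hlen
    simp only [List.getD_eq_getElem?_getD, List.getElem?_eq_getElem hlen, Option.getD_some] at this
    exact this

-- the heart of the equivalence: A's scan over `allowed` equals B's scan over cut points
lemma core (base : List Char) (allowed : List String) :
    (allowed.any (fun a =>
        PySem.Chars.startswith base a.toList &&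
        PySem.Chars.strIsdigit (PySem.Chars.slice base (some ((PySem.Chars.len a.toList : Int))) none)))
      = ((PySem.List.pyRange ((pvRunStart base base.length : Nat) : Int) ((base.length : Nat) : Int) 1).any (fun j =>
          allowed.any (fun a => a.toList == PySem.Chars.slice base none (some j)))) := by
  apply Bool.eq_iff_iff.mpr
  simp only [List.any_eq_true, Bool.and_eq_true, PySem.Chars.startswith_iff,
    PySem.Chars.slice_eq_listSlice, PySem.Chars.len_eq, PySem.List.slice_from_natCast,
    PySem.List.mem_pyRange_one, beq_iff_eq]
  constructor
  · rintro ⟨a, ha, hpre, hdig⟩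
    simp [PySem.Chars.strIsdigit, List.drop_eq_nil_iff] at hdig
    obtain ⟨hne, hall⟩ := hdig
    rw [show a.length = a.toList.length from (String.length_toList (s := a)).symm] at hne hall
    have hmlt : a.toList.length < base.length := by omega
    have hmin : pvRunStart base base.length ≤ a.toList.length :=
      pvRunStart_min base base.length a.toList.length (by omega)
        (fun k hk1 hk2 => (all_drop_iff base a.toList.length).mp hall k hk1 hk2)
    refine ⟨(a.toList.length : Int), ⟨by exact_mod_cast hmin, by exact_mod_cast hmlt⟩, a, ha, ?_⟩
    rw [PySem.List.slice_to_natCast]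
    exact List.prefix_iff_eq_take.mp hpre
  · rintro ⟨j, ⟨hj1, hj2⟩, a, ha, heq⟩
    have hj0 : 0 ≤ j := le_trans (by exact_mod_cast Nat.zero_le _) hj1
    lift j to ℕ using hj0 with jn
    have hj1' : pvRunStart base base.length ≤ jn := by exact_mod_cast hj1
    have hj2' : jn < base.length := by exact_mod_cast hj2
    rw [PySem.List.slice_to_natCast] at heq
    refine ⟨a, ha, ?_, ?_⟩
    · rw [heq]; exact List.take_prefix jn base
    · have hlen : a.toList.length = jn := by
        rw [heq, List.length_take]; omega
      simp [PySem.Chars.strIsdigit, hlen, List.drop_eq_nil_iff]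
      refine ⟨by omega, (all_drop_iff base jn).mpr
        (fun k hk1 hk2 => pvRunStart_digits base base.length k (by omega) hk2)⟩

-- ===== VERDICT (by name: the statement is the Claim_ definition above) =====
theorem matches_form_py_spec : Claim_equal_matches_form_py := by
  intro raw_form allowed include_amendments _
  unfold Spec_matches_form_py matches_form_py matches_form_py_alt
  simp only [List.any_cons, List.any_map, Function.comp]
  set rf := PySem.Chars.upper (PySem.Chars.strip
    (if raw_form.toList = [] then [] else raw_form.toList)) with hrf
  by_cases h1 : rf = []
  · simp [h1]
  · by_cases h2 : (PySem.Chars.isIn ['/', 'A'] rf && !include_amendments) = true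
    · simp [h1, h2]
    · simp only [h1, if_neg h1, h2, Bool.or_false, if_false,
        Bool.false_or, eq_self_iff_true]
      rw [if_neg (by simp [h1, h2])]
      set base := (PySem.Chars.splitOn rf ['/']).headD []
      by_cases hm : (allowed.any (fun a => a.toList == base)) = true
      · simp [hm]
      · rw [Bool.not_eq_true] at hm
        simp only [hm, if_false, Bool.false_or, core base allowed]
        simp [Function.comp_def]
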